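-- pv_equiv track=rewrite | github.com/alynenogu/Exercicio_Python_Brasil_lista_3 | 20.Exercicio.py | calcula_fatorial
-- ===== SOURCE A (Python) =====
-- def calcula_fatorial(numero):
--     contador = 1
--     fatorial = 1
--     fatorial_editada = str(numero)
--
--     while contador <= numero:
--         fatorial *= contador
--         if contador > 1:
--             fatorial_editada = f"{fatorial_editada}.{contador}"
--         contador += 1
--
--     return numero, fatorial, fatorial_editada
-- ===== SOURCE B (Python) =====
-- def calcula_fatorial(numero):
--     terms = [str(numero)] + [str(c) for c in range(2, numero + 1)]
--     fatorial = 1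
--     for c in range(2, numero + 1):
--         fatorial *= c
--     return numero, fatorial, ".".join(terms)
-- ===== Notes on version B (the rewrite author's own statement) =====
-- stated objective: simpler
-- what changed: Replaces the single interleaved while-loop accumulator (counter, running product, growing string) with two independent passes: a product over range(2, n+1) and a '.'.join of precomputed string terms.
import Mathlib
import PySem

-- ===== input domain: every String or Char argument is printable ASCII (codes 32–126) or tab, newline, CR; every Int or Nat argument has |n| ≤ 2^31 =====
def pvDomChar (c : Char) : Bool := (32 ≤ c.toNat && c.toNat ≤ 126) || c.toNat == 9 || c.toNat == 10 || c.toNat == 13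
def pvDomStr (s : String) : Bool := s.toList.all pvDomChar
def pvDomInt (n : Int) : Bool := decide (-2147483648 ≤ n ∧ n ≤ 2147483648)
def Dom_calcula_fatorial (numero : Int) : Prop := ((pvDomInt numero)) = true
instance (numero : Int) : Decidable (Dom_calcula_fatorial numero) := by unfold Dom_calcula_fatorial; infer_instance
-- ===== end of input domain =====

-- B replaces A's single interleaved while-loop accumulator with two independent
-- passes (a product over range(2, n+1) and a '.'.join of precomputed terms); objective: simpler.

-- ===== PORT A =====
-- the while-loop of A: state (contador, fatorial, fatorial_editada)
def calcula_fatorial_go (numero contador fatorial : Int) (fatorial_editada : String) :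
    Int × String :=
  if _h : contador ≤ numero then
    calcula_fatorial_go numero (contador + 1) (fatorial * contador)
      (if contador > 1 then fatorial_editada ++ "." ++ PySem.Int.toStr contador
       else fatorial_editada)
  else (fatorial, fatorial_editada)
termination_by (numero + 1 - contador).toNat
decreasing_by omega

def calcula_fatorial (numero : Int) : Int × Int × String :=
  let r := calcula_fatorial_go numero 1 1 (PySem.Int.toStr numero)
  (numero, r.1, r.2)

-- ===== PORT B =====
def calcula_fatorial_alt (numero : Int) : Int × Int × String :=
  let terms := PySem.Int.toStr numero ::
    (PySem.List.pyRange 2 (numero + 1) 1).map PySem.Int.toStr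
  let fatorial := (PySem.List.pyRange 2 (numero + 1) 1).foldl (· * ·) 1
  (numero, fatorial, PySem.Str.join "." terms)

-- ===== PRECONDITION & SPEC =====
def Spec_calcula_fatorial (numero : Int) (out : Int × Int × String) : Prop := out = calcula_fatorial_alt numero
instance (numero : Int) (out : Int × Int × String) : Decidable (Spec_calcula_fatorial numero out) := by unfold Spec_calcula_fatorial; infer_instance

-- ===== CLAIM (what is proved, stated in full; the proofs are below) =====
def Claim_equal_calcula_fatorial : Prop := ∀ (numero : Int), Dom_calcula_fatorial numero → Spec_calcula_fatorial numero (calcula_fatorial numero)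

-- ===== LEMMAS AND PROOFS =====

-- the loop from contador = c ≥ 2 folds the rest of the range into both accumulators
theorem calcula_fatorial_go_eq (numero : Int) :
    ∀ (c f : Int) (s : String), 2 ≤ c →
      calcula_fatorial_go numero c f s =
        ((PySem.List.pyRange c (numero + 1) 1).foldl (· * ·) f,
         (PySem.List.pyRange c (numero + 1) 1).foldl
           (fun acc k => acc ++ "." ++ PySem.Int.toStr k) s) := by
  intro c f s hc
  by_cases h : c ≤ numero
  case neg =>
    rw [calcula_fatorial_go]
    simp only [h, dif_neg, not_false_iff]
    have : PySem.List.pyRange c (numero + 1) 1 = [] := by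
      rw [PySem.List.pyRange_one]
      have : (numero + 1 - c).toNat = 0 := by omega
      simp [this]
    simp [this]
  case pos =>
    rw [calcula_fatorial_go]
    simp only [dif_pos h]
    rw [PySem.List.pyRange_one_cons (by omega : c < numero + 1)]
    have hgt : c > 1 := by omega
    simp only [if_pos hgt, List.foldl_cons]
    exact calcula_fatorial_go_eq numero (c + 1) (f * c)
      (s ++ "." ++ PySem.Int.toStr c) (by omega)
termination_by c => (numero + 1 - c).toNat
decreasing_by omega

theorem join_dot_foldl (t : String) (ts : List String) :
    PySem.Str.join "." (t :: ts) = ts.foldl (fun acc u => acc ++ "." ++ u) t := by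
  induction ts generalizing t with
  | nil => simp [PySem.Str.join, PySem.Chars.join, List.intercalate]
  | cons u us ih =>
    rw [List.foldl_cons, ← ih (t ++ "." ++ u)]
    cases us with
    | nil => simp [PySem.Str.join, PySem.Chars.join, List.intercalate]
    | cons v vs => simp [PySem.Str.join, PySem.Chars.join_cons_cons]

-- ===== VERDICT (by name: the statement is the Claim_ definition above) =====
theorem calcula_fatorial_spec : Claim_equal_calcula_fatorial := by
  intro numero _
  unfold Spec_calcula_fatorial calcula_fatorial calcula_fatorial_alt
  rw [calcula_fatorial_go]
  by_cases h : (1 : Int) ≤ numero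
  · simp only [dif_pos h]
    have h1 : ¬ ((1 : Int) > 1) := by omega
    rw [if_neg h1]
    rw [calcula_fatorial_go_eq numero (1 + 1) (1 * 1) (PySem.Int.toStr numero) (by omega)]
    rw [join_dot_foldl, List.foldl_map]
    norm_num
  · simp only [dif_neg h]
    have : PySem.List.pyRange 2 (numero + 1) 1 = [] := by
      rw [PySem.List.pyRange_one]
      have : (numero + 1 - 2).toNat = 0 := by omega
      simp [this]
    simp [this, join_dot_foldl]
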